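-- pv_equiv track=rewrite | github.com/boaztait/Braess-s-paradox-of-Generative-AI | code.py | generate_mixed_cyc_scheme
-- ===== SOURCE A (Python) =====
-- def generate_mixed_cyc_scheme(k1, k2, T):
--     i = 1
--     x = []
--
--     # While the current training round does not exceed the horizon
--     while i <= T:
--         # Train after k1 rounds
--         x.append(i)
--         i = i + k1
--
--         if i>T:
--             break
--
--         # Train after k2 rounds
--         x.append(i)
--         i = i + k2
--
--     return x
-- ===== SOURCE B (Python) =====
-- def generate_mixed_cyc_scheme(k1, k2, T):
--     # Closed-form: compute how many elements the scheme has, then generate each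
--     # element directly from its index j: element(j) = (j//2)*(k1+k2) + 1 + (j%2)*k1.
--     if T < 1:
--         return []
--     s = k1 + k2
--     nb = (T - 1) // s + 1                                  # cycle starts 1+t*s that are <= T
--     t0 = (T - 1 - k1) // s + 1 if k1 <= T - 1 else 0       # first cycle whose +k1 point exceeds T
--     m = 2 * t0 + 1 if t0 < nb else 2 * nb                  # total number of emitted points
--     return [(j // 2) * s + 1 + (j % 2) * k1 for j in range(m)]
-- ===== Notes on version B (the rewrite author's own statement) =====
-- stated objective: alternative
-- what changed: B replaces A's stateful while-loop (running index alternately advanced by k1 and k2 with a mid-loop break) by a counting-then-generating scheme: it computes the total number m of emitted points in closed form from floor divisions and then produces element j directly by the index formula (j//2)*(k1+k2)+1+(j%2)*k1, with no running accumulator and no break.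
-- outside the precondition, e.g. on generate_mixed_cyc_scheme(3, -5, 2): A returns [1], B returns []; on generate_mixed_cyc_scheme(1, -1, 3): A does not finish within the time limit, B raises ZeroDivisionError
import Mathlib
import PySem

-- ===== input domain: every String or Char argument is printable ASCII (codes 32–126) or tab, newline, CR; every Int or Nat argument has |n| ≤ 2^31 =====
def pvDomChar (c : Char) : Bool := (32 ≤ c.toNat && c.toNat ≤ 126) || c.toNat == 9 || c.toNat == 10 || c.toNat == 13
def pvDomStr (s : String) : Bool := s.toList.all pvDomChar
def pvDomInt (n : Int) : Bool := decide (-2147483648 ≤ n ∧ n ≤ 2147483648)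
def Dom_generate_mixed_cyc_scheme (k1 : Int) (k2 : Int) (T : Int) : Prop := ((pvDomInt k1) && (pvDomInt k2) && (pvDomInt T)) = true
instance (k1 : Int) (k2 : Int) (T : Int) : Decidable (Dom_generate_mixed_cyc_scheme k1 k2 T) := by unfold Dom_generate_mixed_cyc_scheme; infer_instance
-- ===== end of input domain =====

-- B computes the number of emitted points in closed form and generates each element
-- directly from its index, instead of A's alternating running-index while-loop (objective: alternative).


-- ===== PORT A =====
-- A's while-loop: the fuel argument only makes the recursion total; inside Pre_ it never runs out.
def pvLoopA (k1 : Int) (k2 : Int) (T : Int) : Nat → Int → List Int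
  | 0, _ => []
  | fuel + 1, i =>
    if i ≤ T then
      -- x.append(i); i = i + k1
      let i2 := i + k1
      if i2 > T then [i]            -- break
      else i :: i2 :: pvLoopA k1 k2 T fuel (i2 + k2)   -- x.append(i2); i = i2 + k2
    else []

def generate_mixed_cyc_scheme (k1 : Int) (k2 : Int) (T : Int) : List Int :=
  pvLoopA k1 k2 T (T.toNat + 1) 1

-- ===== PORT B =====
-- Source B's locals s, nb, t0, m and the element formula, as named helpers
def pvS (k1 k2 : Int) : Int := k1 + k2
def pvNb (k1 k2 T : Int) : Int := PySem.Int.floordiv (T - 1) (pvS k1 k2) + 1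
def pvT0 (k1 k2 T : Int) : Int :=
  if k1 ≤ T - 1 then PySem.Int.floordiv (T - 1 - k1) (pvS k1 k2) + 1 else 0
def pvM (k1 k2 T : Int) : Int :=
  if pvT0 k1 k2 T < pvNb k1 k2 T then 2 * pvT0 k1 k2 T + 1 else 2 * pvNb k1 k2 T
def pvElem (k1 k2 j : Int) : Int :=
  PySem.Int.floordiv j 2 * pvS k1 k2 + 1 + PySem.Int.mod j 2 * k1

def generate_mixed_cyc_scheme_alt (k1 : Int) (k2 : Int) (T : Int) : List Int :=
  if T < 1 then []
  else (PySem.List.pyRange 0 (pvM k1 k2 T) 1).map (pvElem k1 k2)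

-- ===== PRECONDITION & SPEC =====
-- Pre_ excludes inputs with T ≥ 1 and k1+k2 ≤ 0: there A either loops forever (when 1+k1 ≤ T)
-- or returns [1] via its mid-cycle break, an artefact no count-based scheme reproduces, while B
-- raises ZeroDivisionError (k1+k2 = 0) or returns a different prefix.
def Pre_generate_mixed_cyc_scheme (k1 : Int) (k2 : Int) (T : Int) : Prop :=
  T < 1 ∨ 1 ≤ k1 + k2
instance (k1 : Int) (k2 : Int) (T : Int) : Decidable (Pre_generate_mixed_cyc_scheme k1 k2 T) := by unfold Pre_generate_mixed_cyc_scheme; infer_instance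
def pvWitness_generate_mixed_cyc_scheme : Int × Int × Int := (2, 3, 20)

def Spec_generate_mixed_cyc_scheme (k1 : Int) (k2 : Int) (T : Int) (out : List Int) : Prop := out = generate_mixed_cyc_scheme_alt k1 k2 T
instance (k1 : Int) (k2 : Int) (T : Int) (out : List Int) : Decidable (Spec_generate_mixed_cyc_scheme k1 k2 T out) := by unfold Spec_generate_mixed_cyc_scheme; infer_instance

-- ===== CLAIM (what is proved, stated in full; the proofs are below) =====
def Claim_equal_generate_mixed_cyc_scheme : Prop := ∀ (k1 : Int) (k2 : Int) (T : Int), Dom_generate_mixed_cyc_scheme k1 k2 T → Pre_generate_mixed_cyc_scheme k1 k2 T → Spec_generate_mixed_cyc_scheme k1 k2 T (generate_mixed_cyc_scheme k1 k2 T)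

-- ===== LEMMAS AND PROOFS =====

-- element formula at an even / odd index
theorem pvElem_even (k1 k2 t : Int) :
    pvElem k1 k2 (2 * t) = 1 + t * (k1 + k2) := by
  unfold pvElem pvS
  rw [PySem.Int.floordiv_eq_ediv_of_pos (by omega : (0:Int) < 2),
      PySem.Int.mod_eq_emod_of_pos (by omega : (0:Int) < 2)]
  have h1 : (2 * t) / 2 = t := by omega
  have h2 : (2 * t) % 2 = 0 := by omega
  rw [h1, h2]; ring

theorem pvElem_odd (k1 k2 t : Int) :
    pvElem k1 k2 (2 * t + 1) = 1 + t * (k1 + k2) + k1 := by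
  unfold pvElem pvS
  rw [PySem.Int.floordiv_eq_ediv_of_pos (by omega : (0:Int) < 2),
      PySem.Int.mod_eq_emod_of_pos (by omega : (0:Int) < 2)]
  have h1 : (2 * t + 1) / 2 = t := by omega
  have h2 : (2 * t + 1) % 2 = 1 := by omega
  rw [h1, h2]; ring

-- bracket: for a positive step s, the cycle start 1 + t*s is within the horizon iff t < pvNb
theorem pvNb_iff (k1 k2 T t : Int) (hs : 0 < k1 + k2) :
    1 + t * (k1 + k2) ≤ T ↔ t < pvNb k1 k2 T := by
  unfold pvNb pvS
  rw [show (t < PySem.Int.floordiv (T - 1) (k1 + k2) + 1 ↔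
        t ≤ PySem.Int.floordiv (T - 1) (k1 + k2)) from by omega,
      PySem.Int.le_floordiv_iff_mul_le hs]
  omega

-- bracket: the +k1 point of cycle t exceeds the horizon iff pvT0 ≤ t (for t ≥ 0)
theorem pvT0_iff (k1 k2 T t : Int) (hs : 0 < k1 + k2) (ht : 0 ≤ t) :
    T < 1 + t * (k1 + k2) + k1 ↔ pvT0 k1 k2 T ≤ t := by
  unfold pvT0 pvS
  split_ifs with hk
  · rw [show (PySem.Int.floordiv (T - 1 - k1) (k1 + k2) + 1 ≤ t ↔
          ¬ t ≤ PySem.Int.floordiv (T - 1 - k1) (k1 + k2)) from by omega,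
        PySem.Int.le_floordiv_iff_mul_le hs]
    omega
  · have : 0 ≤ t * (k1 + k2) := mul_nonneg ht (by omega)
    omega

theorem pvT0_nonneg (k1 k2 T : Int) (hs : 0 < k1 + k2) :
    0 ≤ pvT0 k1 k2 T := by
  unfold pvT0 pvS
  split_ifs with hk
  · have h0 : 0 ≤ PySem.Int.floordiv (T - 1 - k1) (k1 + k2) := by
      rw [PySem.Int.le_floordiv_iff_mul_le hs]; omega
    omega
  · omega

-- main invariant: A's loop from cycle start 1 + t*s produces exactly the tail of B's
-- indexed list from position 2*t, provided no earlier cycle broke (Hprev) and fuel suffices.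
theorem pvLoop_eq (k1 k2 T : Int) (hs : 1 ≤ k1 + k2) (hT : 1 ≤ T) :
    ∀ (fuel : Nat) (t : Int), 0 ≤ t → T < 1 + t * (k1 + k2) + fuel →
      (∀ t', 0 ≤ t' → t' < t → 1 + t' * (k1 + k2) + k1 ≤ T) →
      pvLoopA k1 k2 T fuel (1 + t * (k1 + k2)) =
        (PySem.List.pyRange (2 * t) (pvM k1 k2 T) 1).map (pvElem k1 k2) := by
  have hm_le : pvM k1 k2 T ≤ 2 * pvNb k1 k2 T := by
    unfold pvM; split_ifs with h <;> omega
  intro fuel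
  induction fuel with
  | zero =>
    intro t ht hfuel _
    have hnb : pvNb k1 k2 T ≤ t := by
      by_contra h
      exact absurd ((pvNb_iff k1 k2 T t (by omega)).2 (by omega)) (by push_cast at hfuel; omega)
    rw [PySem.List.pyRange_one_eq_nil (by omega)]
    rfl
  | succ n ih =>
    intro t ht hfuel hprev
    by_cases hle : 1 + t * (k1 + k2) ≤ T
    · have htnb : t < pvNb k1 k2 T := (pvNb_iff k1 k2 T t (by omega)).1 hle
      simp only [pvLoopA, if_pos hle]
      by_cases hbr : 1 + t * (k1 + k2) + k1 > T
      · -- break: this is exactly cycle pvT0, so the list ends after index 2*t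
        have ht0le : pvT0 k1 k2 T ≤ t := (pvT0_iff k1 k2 T t (by omega) ht).1 hbr
        have ht0eq : pvT0 k1 k2 T = t := by
          by_contra h
          have h1 : pvT0 k1 k2 T < t := by omega
          have h2 := hprev (pvT0 k1 k2 T) (pvT0_nonneg k1 k2 T (by omega)) h1
          have h3 := (pvT0_iff k1 k2 T (pvT0 k1 k2 T) (by omega)
            (pvT0_nonneg k1 k2 T (by omega))).2 le_rfl
          omega
        have hm : pvM k1 k2 T = 2 * t + 1 := by
          unfold pvM; rw [if_pos (by omega)]; omega
        rw [hm, if_pos hbr,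
            PySem.List.pyRange_one_cons (by omega),
            PySem.List.pyRange_one_eq_nil (by omega)]
        simp [pvElem_even k1 k2 t]
      · -- continue: indices 2*t and 2*t+1 are both inside the list, recurse at cycle t+1
        have ht0gt : t < pvT0 k1 k2 T := by
          by_contra h
          exact hbr ((pvT0_iff k1 k2 T t (by omega) ht).2 (by omega))
        have hm_gt : 2 * t + 1 < pvM k1 k2 T := by
          unfold pvM; split_ifs with h <;> omega
        rw [if_neg hbr,
            PySem.List.pyRange_one_cons (by omega),
            PySem.List.pyRange_one_cons (by omega)]
        simp only [List.map_cons]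
        rw [pvElem_even k1 k2 t, pvElem_odd k1 k2 t]
        have hnext : 1 + t * (k1 + k2) + k1 + k2 = 1 + (t + 1) * (k1 + k2) := by ring
        rw [hnext, show (2 * t + 1 + 1 : Int) = 2 * (t + 1) from by ring]
        rw [ih (t + 1) (by omega)
          (by have hx : t * (k1 + k2) + (k1 + k2) = (t + 1) * (k1 + k2) := by ring
              push_cast at hfuel ⊢
              omega)
          (by intro t' h0 h1
              by_cases h2 : t' < t
              · exact hprev t' h0 h2
              · have : t' = t := by omega
                subst this; omega)]
    · have hnb : pvNb k1 k2 T ≤ t := by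
        by_contra h
        exact hle ((pvNb_iff k1 k2 T t (by omega)).2 (by omega))
      rw [PySem.List.pyRange_one_eq_nil (by omega)]
      simp [pvLoopA, hle]

-- ===== VERDICT (by name: the statement is the Claim_ definition above) =====
theorem generate_mixed_cyc_scheme_spec : Claim_equal_generate_mixed_cyc_scheme := by
  intro k1 k2 T _ hpre
  unfold Spec_generate_mixed_cyc_scheme generate_mixed_cyc_scheme generate_mixed_cyc_scheme_alt
  by_cases hT : T < 1
  · rw [if_pos hT]
    have : ¬ (1 : Int) ≤ T := by omega
    simp [pvLoopA, this]
  · rw [if_neg hT]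
    have hs : 1 ≤ k1 + k2 := by
      rcases hpre with h | h
      · omega
      · exact h
    have h0 : (1 : Int) = 1 + 0 * (k1 + k2) := by ring
    rw [h0, pvLoop_eq k1 k2 T hs (by omega) (T.toNat + 1) 0 le_rfl
      (by have : (T.toNat : Int) = T := by omega
          push_cast; omega)
      (by intro t' h0' h1'; omega)]
    norm_num
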